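-- pv_equiv track=rewrite | github.com/d1ck5on/algo | part1/hw01/D/solution.py | solution
-- ===== SOURCE A (Python) =====
-- def solution(n, k, m):
--     if n < k:
--         return 0
--     if k // m == 0:
--         return 0
--
--     amount_k = n // k
--     n %= k
--
--     amount_m = (k // m) * amount_k
--
--     n += amount_k * (k % m)
--
--     return amount_m + solution(n, k, m)
-- ===== SOURCE B (Python) =====
-- def solution(n, k, m):
--     if n < k:
--         return 0
--     if k // m == 0:
--         return 0
--     start = n
--     while n >= k:
--         n = n % k + (n // k) * (k % m)
--     return (start - n) // m
-- ===== Notes on version B (the rewrite author's own statement) =====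
-- stated objective: alternative
-- what changed: Instead of summing per-step contributions (k//m)*amount_k through the recursion, B only iterates the reduction of n and recovers the count at the end by conservation: each counted item consumes exactly m units, so the answer is (start - final_n) // m.
import Mathlib
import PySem

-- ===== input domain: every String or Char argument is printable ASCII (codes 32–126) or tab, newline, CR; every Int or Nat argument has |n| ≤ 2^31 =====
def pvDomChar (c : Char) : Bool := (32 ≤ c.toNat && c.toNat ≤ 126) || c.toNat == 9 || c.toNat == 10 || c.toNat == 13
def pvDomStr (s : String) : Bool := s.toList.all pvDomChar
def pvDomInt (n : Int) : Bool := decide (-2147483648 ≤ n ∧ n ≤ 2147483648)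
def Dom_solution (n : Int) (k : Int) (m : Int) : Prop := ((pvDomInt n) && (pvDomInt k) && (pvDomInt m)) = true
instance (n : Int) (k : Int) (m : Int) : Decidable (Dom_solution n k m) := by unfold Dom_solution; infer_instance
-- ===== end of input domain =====

-- B drops the per-step count accumulation: it only iterates A's reduction of n and
-- recovers the count afterwards as (start - final n) // m (each counted item consumes
-- exactly m units). Alternative decomposition, same cost.


-- ===== PORT A =====
-- fuel only makes the recursion total; on every input admitted by Pre_solution the
-- Python recursion is shallow (n shrinks at least geometrically for k ≥ 1, and the
-- admitted k ≤ -1 trajectories have length ≤ 4), so fuel n.toNat + 100 never runs out.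
def solGo : Nat → Int → Int → Int → Int
  | 0, _, _, _ => 0
  | f + 1, n, k, m =>
    if n < k then 0
    else if PySem.Int.floordiv k m = 0 then 0
    else
      let amount_k := PySem.Int.floordiv n k
      let n1 := PySem.Int.mod n k
      let amount_m := PySem.Int.floordiv k m * amount_k
      let n2 := n1 + amount_k * PySem.Int.mod k m
      amount_m + solGo f n2 k m

def solution (n : Int) (k : Int) (m : Int) : Int := solGo (n.toNat + 100) n k m

-- ===== PORT B =====
-- the while-loop carries only n; same fuel bound as A's port.
def altLoop : Nat → Int → Int → Int → Int
  | 0, n, _, _ => n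
  | f + 1, n, k, m =>
    if n ≥ k then
      altLoop f (PySem.Int.mod n k + PySem.Int.floordiv n k * PySem.Int.mod k m) k m
    else n

def solution_alt (n : Int) (k : Int) (m : Int) : Int :=
  if n < k then 0
  else if PySem.Int.floordiv k m = 0 then 0
  else PySem.Int.floordiv (n - altLoop (n.toNat + 100) n k m) m

-- ===== PRECONDITION & SPEC =====
-- Pre_solution admits exactly the inputs on which Python A returns: it excludes only
-- m = 0 with n ≥ k (ZeroDivisionError) and the inputs where A's recursion never
-- terminates (RecursionError), namely k ≤ -1 with n ≥ k except the few trajectories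
-- (of length ≤ 4, written out below via one step s x = x%k + (x//k)*(k%m)) that drop
-- below k, and k ≤ -1 ≤ m both negative with |m| ≤ |k| (the step never drops below k).
def preStep (x : Int) (k : Int) (m : Int) : Int :=
  PySem.Int.mod x k + PySem.Int.floordiv x k * PySem.Int.mod k m

def Pre_solution (n : Int) (k : Int) (m : Int) : Prop :=
  n < k
  ∨ (m ≠ 0 ∧ 0 ≤ k)
  ∨ (k ≤ -1 ∧ m ≤ -1 ∧ m < k)
  ∨ (k ≤ -1 ∧ 1 ≤ m ∧ n = k ∧ PySem.Int.mod k m ≠ 0 ∧ preStep (PySem.Int.mod k m) k m < k)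
  ∨ (k ≤ -1 ∧ 1 ≤ m ∧ 0 < n ∧
      (preStep n k m < k ∨
        (preStep n k m = k ∧ PySem.Int.mod k m ≠ 0 ∧ preStep (PySem.Int.mod k m) k m < k)))
instance (n : Int) (k : Int) (m : Int) : Decidable (Pre_solution n k m) := by
  unfold Pre_solution; infer_instance

def pvWitness_solution : Int × Int × Int := (100, 7, 3)

def Spec_solution (n : Int) (k : Int) (m : Int) (out : Int) : Prop := out = solution_alt n k m
instance (n : Int) (k : Int) (m : Int) (out : Int) : Decidable (Spec_solution n k m out) := by
  unfold Spec_solution; infer_instance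

-- ===== CLAIM (what is proved, stated in full; the proofs are below) =====
def Claim_equal_solution : Prop := ∀ (n : Int) (k : Int) (m : Int),
  Dom_solution n k m → Pre_solution n k m → Spec_solution n k m (solution n k m)

-- ===== LEMMAS AND PROOFS =====

-- conservation invariant: with k//m ≠ 0, what the loop removed from n is exactly
-- m times what the recursion counted (each counted item consumes m units)
theorem altLoop_eq_sub (k m : Int) (h : PySem.Int.floordiv k m ≠ 0) :
    ∀ (f : Nat) (n : Int), altLoop f n k m = n - m * solGo f n k m := by
  intro f
  induction f with
  | zero => intro n; simp [altLoop, solGo]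
  | succ f ih =>
    intro n
    by_cases hn : n < k
    · simp [altLoop, solGo, hn, not_le.mpr hn]
    · simp only [altLoop, solGo, ge_iff_le, not_lt.mp hn, if_true, if_neg hn, if_neg h]
      rw [ih]
      have hk := PySem.Int.floordiv_mul_add_mod n k
      have hm := PySem.Int.floordiv_mul_add_mod k m
      linear_combination (PySem.Int.floordiv n k) * hm + hk

-- PySem's floor division is Mathlib's Int.fdiv
theorem floordiv_eq_fdiv (a b : Int) : PySem.Int.floordiv a b = Int.fdiv a b := by
  rcases a with (_ | x) | x <;> rcases b with (_ | y) | y <;> simp [PySem.Int.floordiv, Int.fdiv]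

-- if k//m ≠ 0 then m ≠ 0 (floor division by zero yields 0 in the port)
theorem m_ne_zero_of_floordiv_ne (k m : Int) (h : PySem.Int.floordiv k m ≠ 0) : m ≠ 0 := by
  intro hm
  apply h
  subst hm
  rcases k with (_ | x) | x <;> simp [PySem.Int.floordiv]

-- ===== VERDICT (by name: the statement is the Claim_ definition above) =====
theorem solution_spec : Claim_equal_solution := by
  intro n k m _ _
  unfold Spec_solution solution solution_alt
  by_cases hn : n < k
  · simp [solGo, hn]
  · by_cases hc : PySem.Int.floordiv k m = 0
    · simp [solGo, hn, hc]
    · have hm : m ≠ 0 := m_ne_zero_of_floordiv_ne k m hc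
      simp only [if_neg hn, if_neg hc]
      rw [altLoop_eq_sub k m hc]
      have hs : n - (n - m * solGo (n.toNat + 100) n k m) = m * solGo (n.toNat + 100) n k m := by
        ring
      rw [hs, floordiv_eq_fdiv, Int.mul_fdiv_cancel_left _ hm]
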